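-- pv_equiv track=rewrite | github.com/Emileeem/CarPlateRecognize-NeuralNetwork | main_02.py | aplicar_substituicoes
-- ===== SOURCE A (Python) =====
-- def aplicar_substituicoes(texto):
--     substituicoes = {
--         'A': '4',
--         '4': 'A',
--         'O': '0',
--         '0': 'O',
--         'D': '0',
--         '0': 'D',
--         'W': 'M',
--         'M': 'W',
--         '1': 'I',
--         'I': '1',
--         "'": ""
--     }
--     for chave, valor in substituicoes.items():
--         texto = texto.replace(chave, valor)
--     return texto
-- ===== SOURCE B (Python) =====
-- _TABLE = str.maketrans({'4': 'A', 'O': '0', 'D': '0', 'M': 'W', 'I': '1', "'": None})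
--
-- def aplicar_substituicoes(texto):
--     return texto.translate(_TABLE)
-- ===== Notes on version B (the rewrite author's own statement) =====
-- stated objective: idiomatic
-- what changed: Replaces A's ten sequential whole-string str.replace passes by a single pass through texto.translate with the precomputed net character table (4->A, O->0, D->0, M->W, I->1, apostrophe deleted).
import Mathlib
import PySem

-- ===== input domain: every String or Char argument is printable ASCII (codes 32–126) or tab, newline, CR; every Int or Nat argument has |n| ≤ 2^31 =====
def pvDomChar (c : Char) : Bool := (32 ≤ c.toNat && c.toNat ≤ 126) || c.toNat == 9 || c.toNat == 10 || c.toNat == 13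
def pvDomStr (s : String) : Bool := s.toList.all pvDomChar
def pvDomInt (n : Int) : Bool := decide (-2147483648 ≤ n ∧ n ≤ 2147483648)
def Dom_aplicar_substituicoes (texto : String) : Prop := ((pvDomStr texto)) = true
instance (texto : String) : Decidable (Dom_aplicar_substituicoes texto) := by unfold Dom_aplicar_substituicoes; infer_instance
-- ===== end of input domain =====

-- B replaces A's ten sequential str.replace passes by one pass over the string through the
-- precomputed net translation table (str.maketrans/translate); equivalence of return values is proved.

-- ===== PORT A =====
-- the dict literal, built key by key in source order (the duplicate key '0' overwrites in place)
def pvSubstituicoes : PySem.Dict String String :=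
  (((((((((((PySem.Dict.empty).insert "A" "4").insert "4" "A").insert "O" "0").insert "0" "O").insert
    "D" "0").insert "0" "D").insert "W" "M").insert "M" "W").insert "1" "I").insert "I" "1").insert "'" ""

def aplicar_substituicoes (texto : String) : String :=
  pvSubstituicoes.items.foldl (fun t kv => PySem.Str.replace t kv.1 kv.2) texto

-- ===== PORT B =====
-- Source B's str.translate is ported by hand (PySem has no translate): exact per-character
-- table lookup — the table's chars map to their replacement, the apostrophe to nothing.
def pvTableB (c : Char) : List Char :=
  if c = '4' then ['A']
  else if c = 'O' then ['0']
  else if c = 'D' then ['0']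
  else if c = 'M' then ['W']
  else if c = 'I' then ['1']
  else if c = '\'' then []
  else [c]

def aplicar_substituicoes_alt (texto : String) : String :=
  String.ofList (texto.toList.flatMap pvTableB)

-- ===== PRECONDITION & SPEC =====
def Spec_aplicar_substituicoes (texto : String) (out : String) : Prop := out = aplicar_substituicoes_alt texto
instance (texto : String) (out : String) : Decidable (Spec_aplicar_substituicoes texto out) := by unfold Spec_aplicar_substituicoes; infer_instance

-- ===== CLAIM (what is proved, stated in full; the proofs are below) =====
def Claim_equal_aplicar_substituicoes : Prop := ∀ (texto : String), Dom_aplicar_substituicoes texto → Spec_aplicar_substituicoes texto (aplicar_substituicoes texto)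

-- ===== LEMMAS AND PROOFS =====

-- single-character replacement acts pointwise
theorem replace_go_single (a : Char) (new : List Char) :
    ∀ (fuel : Nat) (l acc : List Char), l.length ≤ fuel →
      PySem.Chars.replace.go [a] new fuel l acc
        = acc.reverse ++ l.flatMap (fun c => if c = a then new else [c]) := by
  intro fuel
  induction fuel with
  | zero =>
    intro l acc h
    have : l = [] := List.eq_nil_of_length_eq_zero (Nat.le_zero.mp h)
    subst this
    simp [PySem.Chars.replace.go]
  | succ n ih =>
    intro l acc h
    cases l with
    | nil => simp [PySem.Chars.replace.go]
    | cons c t =>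
      simp only [PySem.Chars.replace.go]
      by_cases hc : c = a
      · subst hc
        have hp : List.isPrefixOf [c] (c :: t) = true := by
          simp [List.isPrefixOf]
        rw [if_pos hp]
        simp only [List.length_nil, List.length_cons, List.drop_succ_cons, List.drop_zero]
        rw [ih t (new.reverse ++ acc) (by simpa using Nat.le_of_succ_le_succ h)]
        simp
      · have hp : List.isPrefixOf [a] (c :: t) = false := by
          simp [List.isPrefixOf]
          intro h'; exact absurd h'.symm hc
        rw [if_neg (by simp [hp])]
        have := ih t (c :: acc) (by simpa using Nat.le_of_succ_le_succ h)
        rw [this]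
        simp [hc]

theorem replace_single (s : List Char) (a : Char) (new : List Char) :
    PySem.Chars.replace s [a] new = s.flatMap (fun c => if c = a then new else [c]) := by
  rw [PySem.Chars.replace]
  simp only [List.isEmpty_cons, Bool.false_eq_true, if_false]
  simpa using replace_go_single a new s.length s [] (le_refl _)

theorem flatMap_flatMap_assoc {α β γ : Type} (l : List α) (f : α → List β) (g : β → List γ) :
    (l.flatMap f).flatMap g = l.flatMap (fun a => (f a).flatMap g) := by
  induction l with
  | nil => rfl
  | cons x xs ih => simp [List.flatMap_cons, List.flatMap_append, ih]

theorem items_eval : pvSubstituicoes.items =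
    [("A","4"),("4","A"),("O","0"),("0","D"),("D","0"),("W","M"),("M","W"),("1","I"),("I","1"),("'","")] := by
  decide

-- ===== VERDICT (by name: the statement is the Claim_ definition above) =====
theorem aplicar_substituicoes_spec : Claim_equal_aplicar_substituicoes := by
  intro texto _
  show _ = _
  unfold aplicar_substituicoes aplicar_substituicoes_alt
  apply String.toList_injective
  rw [items_eval]
  simp only [List.foldl_cons, List.foldl_nil, PySem.Str.toList_replace, String.toList_ofList]
  have h1 : ("A" : String).toList = ['A'] := rfl
  have h2 : ("4" : String).toList = ['4'] := rfl
  have h3 : ("O" : String).toList = ['O'] := rfl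
  have h4 : ("0" : String).toList = ['0'] := rfl
  have h5 : ("D" : String).toList = ['D'] := rfl
  have h6 : ("W" : String).toList = ['W'] := rfl
  have h7 : ("M" : String).toList = ['M'] := rfl
  have h8 : ("1" : String).toList = ['1'] := rfl
  have h9 : ("I" : String).toList = ['I'] := rfl
  have h0 : ("'" : String).toList = ['\''] := rfl
  have hE : ("" : String).toList = [] := rfl
  simp only [h1, h2, h3, h4, h5, h6, h7, h8, h9, h0, hE]
  simp only [replace_single]
  simp only [flatMap_flatMap_assoc]
  congr 1
  funext c
  by_cases hA : c = 'A'
  · subst hA; decide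
  by_cases h4c : c = '4'
  · subst h4c; decide
  by_cases hO : c = 'O'
  · subst hO; decide
  by_cases h0c : c = '0'
  · subst h0c; decide
  by_cases hD : c = 'D'
  · subst hD; decide
  by_cases hW : c = 'W'
  · subst hW; decide
  by_cases hM : c = 'M'
  · subst hM; decide
  by_cases h1c : c = '1'
  · subst h1c; decide
  by_cases hI : c = 'I'
  · subst hI; decide
  by_cases hq : c = '\''
  · subst hq; decide
  simp [pvTableB, List.flatMap_cons, List.flatMap_nil, hA, h4c, hO, h0c, hD, hW, hM, h1c, hI, hq]
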